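-- pv_equiv track=rewrite | github.com/joshanashakya/dissertation | workspace/dataset/java-python/GeeksForGeeks/532/A/2.py | countSubSeq
-- ===== SOURCE A (Python) =====
-- def countSubSeq(i, Sum, cnt, a, n):
--
--     # Base case
--     if (i == n):
--
--         # Check if the Sum is 0
--         # and at least a single element
--         # is in the sub-sequence
--         if (Sum == 0 and cnt > 0):
--             return 1
--         else:
--             return 0
--     ans = 0
--
--     # Do not take the number in
--     # the current sub-sequence
--     ans += countSubSeq(i + 1, Sum, cnt, a, n)
--
--     # Take the number in the
--     # current sub-sequence
--     ans += countSubSeq(i + 1, Sum + a[i],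
--                            cnt + 1, a, n)
--
--     return ans
-- ===== SOURCE B (Python) =====
-- def countSubSeq(i, Sum, cnt, a, n):
--     # Iterative subset-sum enumeration: one flat list of subset sums, doubled
--     # once per element; the subset's size is recovered from the popcount of
--     # its index, so no recursion and only one list is maintained.
--     sums = [0]
--     for j in range(i, n):
--         x = a[j]
--         sums += [s + x for s in sums]
--     t = -Sum
--     return sum(1 for idx, s in enumerate(sums) if s == t and cnt + idx.bit_count() > 0)
-- ===== Notes on version B (the rewrite author's own statement) =====
-- stated objective: alternative
-- what changed: Replaces A's binary recursion (two recursive calls per element, one stack frame per subset) with an iterative loop that doubles a single flat list of subset sums and recovers each subset's size from the popcount of its list index, counting matches in one final scan.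
import Mathlib
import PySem

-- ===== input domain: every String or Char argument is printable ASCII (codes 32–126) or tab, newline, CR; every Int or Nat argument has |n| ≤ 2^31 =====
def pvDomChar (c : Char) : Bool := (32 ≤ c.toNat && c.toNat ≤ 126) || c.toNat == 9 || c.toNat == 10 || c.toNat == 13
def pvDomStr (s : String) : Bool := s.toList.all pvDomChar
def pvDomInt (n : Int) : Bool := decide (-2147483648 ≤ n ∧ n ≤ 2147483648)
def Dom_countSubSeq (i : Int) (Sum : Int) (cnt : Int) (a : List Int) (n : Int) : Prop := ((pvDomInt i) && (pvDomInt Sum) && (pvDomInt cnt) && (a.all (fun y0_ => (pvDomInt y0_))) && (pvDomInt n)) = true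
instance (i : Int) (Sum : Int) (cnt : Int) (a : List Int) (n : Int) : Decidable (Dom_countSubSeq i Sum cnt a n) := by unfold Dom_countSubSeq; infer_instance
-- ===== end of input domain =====

-- B replaces A's binary recursion by an iterative doubling of one flat list of
-- subset sums (subset size recovered from the popcount of the list index);
-- objective: alternative (no recursion, same cost). Return values only.

-- ===== PORT A =====
-- A recurses on i until i == n; fuel = n - i counts the remaining depth
-- (fuel = 0 with i ≠ n is unreachable under Pre_).
def countSubSeqGo (fuel : Nat) (i : Int) (Sum : Int) (cnt : Int) (a : List Int) (n : Int) : Int :=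
  if i = n then
    if Sum = 0 ∧ cnt > 0 then 1 else 0
  else
    match fuel with
    | 0 => 0
    | f + 1 =>
      let ans : Int := 0
      let ans := ans + countSubSeqGo f (i + 1) Sum cnt a n
      -- a[i]: PySem.List.pyGetD is exact under Pre_ (index in range)
      let ans := ans + countSubSeqGo f (i + 1) (Sum + PySem.List.pyGetD a i 0) (cnt + 1) a n
      ans

def countSubSeq (i : Int) (Sum : Int) (cnt : Int) (a : List Int) (n : Int) : Int :=
  countSubSeqGo (n - i).toNat i Sum cnt a n

-- ===== PORT B =====
-- idx.bit_count() of a nonnegative Python int (fuel m ≥ m keeps it structural)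
def pvPopCountAux : Nat → Nat → Nat
  | 0, _ => 0
  | f + 1, m => if m = 0 then 0 else pvPopCountAux f (m / 2) + m % 2

def pvPopCount (m : Nat) : Nat := pvPopCountAux m m

def countSubSeq_alt (i : Int) (Sum : Int) (cnt : Int) (a : List Int) (n : Int) : Int :=
  let sums := (PySem.List.pyRange i n 1).foldl
    (fun sums j =>
      let x := PySem.List.pyGetD a j 0
      sums ++ sums.map (fun s => s + x)) [0]
  let t := -Sum
  (PySem.List.enumerate sums 0).foldl
    (fun acc p => if p.2 = t ∧ cnt + (pvPopCount p.1.toNat : Int) > 0 then acc + 1 else acc) 0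

-- ===== PRECONDITION & SPEC =====
-- Pre_ excludes exactly the inputs where the Python A raises: n < i (unbounded
-- recursion, RecursionError) and any index in [i, n) out of range (IndexError).
def Pre_countSubSeq (i : Int) (Sum : Int) (cnt : Int) (a : List Int) (n : Int) : Prop :=
  i ≤ n ∧ (i < n → -(a.length : Int) ≤ i ∧ n ≤ (a.length : Int))
instance (i : Int) (Sum : Int) (cnt : Int) (a : List Int) (n : Int) : Decidable (Pre_countSubSeq i Sum cnt a n) := by unfold Pre_countSubSeq; infer_instance

def pvWitness_countSubSeq : Int × Int × Int × List Int × Int := (0, 0, 0, [1, -1, 2], 3)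

def Spec_countSubSeq (i : Int) (Sum : Int) (cnt : Int) (a : List Int) (n : Int) (out : Int) : Prop := out = countSubSeq_alt i Sum cnt a n
instance (i : Int) (Sum : Int) (cnt : Int) (a : List Int) (n : Int) (out : Int) : Decidable (Spec_countSubSeq i Sum cnt a n out) := by unfold Spec_countSubSeq; infer_instance

-- ===== CLAIM (what is proved, stated in full; the proofs are below) =====
def Claim_equal_countSubSeq : Prop := ∀ (i : Int) (Sum : Int) (cnt : Int) (a : List Int) (n : Int), Dom_countSubSeq i Sum cnt a n → Pre_countSubSeq i Sum cnt a n → Spec_countSubSeq i Sum cnt a n (countSubSeq i Sum cnt a n)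
-- ===== LEMMAS AND PROOFS =====

-- the elements a[i], a[i+1], …, a[n-1] (fuel = n - i)
def pvElems : Nat → Int → List Int → List Int
  | 0, _, _ => []
  | f + 1, i, a => PySem.List.pyGetD a i 0 :: pvElems f (i + 1) a

-- reference spec: the count, by recursion on the element list
def pvSub : List Int → Int → Int → Int
  | [], S, c => if S = 0 ∧ c > 0 then 1 else 0
  | x :: l, S, c => pvSub l S c + pvSub l (S + x) (c + 1)

-- the doubled subset-sum list; the first element is the lowest bit of the index
def pvSumsL : List Int → List Int
  | [] => [0]
  | x :: l => (pvSumsL l).flatMap (fun σ => [σ, σ + x])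

-- (sum, size) of every subset, in the same order
def pvStates : List Int → List (Int × Int)
  | [] => [(0, 0)]
  | x :: l => (pvStates l).flatMap (fun p => [p, (p.1 + x, p.2 + 1)])

theorem pvGo_eq_pvSub (f : Nat) : ∀ (i Sum cnt : Int) (a : List Int) (n : Int),
    i + f = n → countSubSeqGo f i Sum cnt a n = pvSub (pvElems f i a) Sum cnt := by
  induction f with
  | zero =>
    intro i Sum cnt a n h
    have hi : i = n := by omega
    simp [countSubSeqGo, pvElems, pvSub, hi]
  | succ f ih =>
    intro i Sum cnt a n h
    have hne : i ≠ n := by omega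
    rw [countSubSeqGo]
    simp only [if_neg hne]
    rw [ih (i + 1) Sum cnt a n (by omega), ih (i + 1) _ _ a n (by omega)]
    simp [pvElems, pvSub]

theorem pvFoldl_structure (a : List Int) : ∀ (r : List Int) (start : List Int),
    r.foldl (fun sums j => sums ++ sums.map (fun s => s + PySem.List.pyGetD a j 0)) start
      = (r.foldl (fun sums j => sums ++ sums.map (fun s => s + PySem.List.pyGetD a j 0)) [0]).flatMap
          (fun σ => start.map (fun s => s + σ)) := by
  intro r
  induction r with
  | nil => intro start; simp
  | cons j r ih =>
    intro start
    simp only [List.foldl_cons]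
    rw [ih (start ++ start.map (fun s => s + PySem.List.pyGetD a j 0)),
        ih ([0] ++ [0].map (fun s => s + PySem.List.pyGetD a j 0))]
    rw [List.flatMap_assoc]
    apply List.flatMap_congr
    intro σ _
    simp [add_assoc]

theorem pvFold_eq_sumsL (a : List Int) : ∀ (f : Nat) (i n : Int), i + f = n →
    (PySem.List.pyRange i n 1).foldl
        (fun sums j => sums ++ sums.map (fun s => s + PySem.List.pyGetD a j 0)) [0]
      = pvSumsL (pvElems f i a) := by
  intro f
  induction f with
  | zero =>
    intro i n h
    rw [PySem.List.pyRange_one_eq_nil (by omega)]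
    simp [pvSumsL, pvElems]
  | succ f ih =>
    intro i n h
    rw [PySem.List.pyRange_one_cons (by omega)]
    simp only [List.foldl_cons]
    rw [pvFoldl_structure a (PySem.List.pyRange (i+1) n 1)
        ([0] ++ [0].map (fun s => s + PySem.List.pyGetD a i 0))]
    rw [ih (i + 1) n (by omega)]
    simp only [pvElems, pvSumsL]
    apply List.flatMap_congr
    intro σ _
    simp [add_comm]

-- pvPopCountAux ignores the fuel once fuel ≥ m
theorem pvPopCountAux_zero (f : Nat) : pvPopCountAux f 0 = 0 := by
  cases f <;> simp [pvPopCountAux]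

theorem pvPopCountAux_congr : ∀ (f1 f2 m : Nat), m ≤ f1 → m ≤ f2 →
    pvPopCountAux f1 m = pvPopCountAux f2 m := by
  intro f1
  induction f1 with
  | zero =>
    intro f2 m h1 _
    have hm : m = 0 := by omega
    subst hm
    rw [pvPopCountAux_zero, pvPopCountAux_zero]
  | succ f ih =>
    intro f2 m h1 h2
    rcases Nat.eq_zero_or_pos m with hm | hm
    · subst hm
      rw [pvPopCountAux_zero, pvPopCountAux_zero]
    · obtain ⟨g, rfl⟩ : ∃ g, f2 = g + 1 := ⟨f2 - 1, by omega⟩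
      show (if m = 0 then 0 else pvPopCountAux f (m / 2) + m % 2)
          = (if m = 0 then 0 else pvPopCountAux g (m / 2) + m % 2)
      rw [if_neg (by omega), if_neg (by omega), ih g (m / 2) (by omega) (by omega)]

theorem pvPopCount_step (m : Nat) (hm : m ≠ 0) :
    pvPopCount m = pvPopCount (m / 2) + m % 2 := by
  obtain ⟨f, rfl⟩ : ∃ f, m = f + 1 := ⟨m - 1, by omega⟩
  show (if f + 1 = 0 then 0 else pvPopCountAux f ((f + 1) / 2) + (f + 1) % 2) = _
  rw [if_neg (by omega),
    pvPopCountAux_congr f ((f + 1) / 2) ((f + 1) / 2) (by omega) (le_refl _)]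
  rfl

theorem pvPopCount_two_mul (m : Nat) : pvPopCount (2 * m) = pvPopCount m := by
  rcases Nat.eq_zero_or_pos m with hm | hm
  · subst hm; rfl
  · rw [pvPopCount_step (2 * m) (by omega)]
    have h1 : 2 * m / 2 = m := by omega
    have h2 : 2 * m % 2 = 0 := by omega
    rw [h1, h2]
    rfl

theorem pvPopCount_two_mul_add_one (m : Nat) : pvPopCount (2 * m + 1) = pvPopCount m + 1 := by
  rw [pvPopCount_step (2 * m + 1) (by omega)]
  have h1 : (2 * m + 1) / 2 = m := by omega
  have h2 : (2 * m + 1) % 2 = 1 := by omega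
  rw [h1, h2]

-- enumerate of a two-element-block flatMap
theorem pvEnum2 (x : Int) : ∀ (L : List Int) (s : Int),
    PySem.List.enumerate (L.flatMap (fun σ => [σ, σ + x])) (2 * s)
      = (PySem.List.enumerate L s).flatMap
          (fun p => [(2 * p.1, p.2), (2 * p.1 + 1, p.2 + x)]) := by
  intro L
  induction L with
  | nil => intro s; simp [PySem.List.enumerate]
  | cons σ L ih =>
    intro s
    simp only [List.flatMap_cons, List.cons_append, List.nil_append,
      PySem.List.enumerate_cons]
    have h2 : 2 * s + 1 + 1 = 2 * (s + 1) := by ring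
    rw [h2, ih (s + 1)]

-- the (sum, popcount-of-index) view of the doubled list is exactly pvStates
theorem pvEnum_states : ∀ (l : List Int),
    (PySem.List.enumerate (pvSumsL l) 0).map
        (fun p => (p.2, (pvPopCount p.1.toNat : Int))) = pvStates l := by
  intro l
  induction l with
  | nil => rfl
  | cons x l ih =>
    show (PySem.List.enumerate ((pvSumsL l).flatMap (fun σ => [σ, σ + x])) 0).map
        (fun p => (p.2, (pvPopCount p.1.toNat : Int))) = pvStates (x :: l)
    have h0 : (0 : Int) = 2 * 0 := by ring
    rw [h0, pvEnum2 x (pvSumsL l) 0, List.map_flatMap]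
    have hcong : ∀ p ∈ PySem.List.enumerate (pvSumsL l) 0,
        ((fun (q : Int × Int) => [(2 * q.1, q.2), (2 * q.1 + 1, q.2 + x)]) p).map
            (fun p => (p.2, (pvPopCount p.1.toNat : Int)))
          = (fun (q : Int × Int) => [q, (q.1 + x, q.2 + 1)])
              ((fun (p : Int × Int) => (p.2, (pvPopCount p.1.toNat : Int))) p) := by
      intro p hp
      rcases (PySem.List.mem_enumerate_iff _ _ _).mp hp with ⟨k, hk, rfl⟩
      simp only [List.map_cons, List.map_nil]
      have e1 : ((2 : Int) * (0 + (k : Int))).toNat = 2 * k := by omega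
      have e2 : ((2 : Int) * (0 + (k : Int)) + 1).toNat = 2 * k + 1 := by omega
      have e3 : ((0 : Int) + (k : Int)).toNat = k := by omega
      rw [e1, e2, e3, pvPopCount_two_mul, pvPopCount_two_mul_add_one]
      push_cast
      rfl
    rw [List.flatMap_congr hcong]
    rw [← List.flatMap_map (fun p : Int × Int => (p.2, (pvPopCount p.1.toNat : Int)))
          (fun q : Int × Int => [q, (q.1 + x, q.2 + 1)])
          (PySem.List.enumerate (pvSumsL l) 0)]
    rw [ih]
    rfl

-- foldl over an if-count is countP
theorem pvFoldl_if_count {α : Type} (p : α → Prop) [DecidablePred p] :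
    ∀ (L : List α) (acc : Int),
      L.foldl (fun acc q => if p q then acc + 1 else acc) acc
        = acc + (L.countP (fun q => decide (p q)) : Int) := by
  intro L
  induction L with
  | nil => intro acc; simp
  | cons q L ih =>
    intro acc
    simp only [List.foldl_cons, List.countP_cons]
    by_cases h : p q <;> simp [h, ih] <;> push_cast <;> ring

-- countP over two-element-block flatMap
theorem pvCountP_pairflat {α : Type} (sh : α → α) (p : α → Bool) :
    ∀ (L : List α), (L.flatMap (fun q => [q, sh q])).countP p
      = L.countP p + L.countP (fun q => p (sh q)) := by
  intro L
  induction L with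
  | nil => simp
  | cons q L ih =>
    simp only [List.flatMap_cons, List.countP_append, List.countP_cons, ih,
      List.countP_nil]
    omega

theorem pvStates_count : ∀ (l : List Int) (Sum cnt : Int),
    ((pvStates l).countP (fun q => decide (q.1 = -Sum ∧ cnt + q.2 > 0)) : Int)
      = pvSub l Sum cnt := by
  intro l
  induction l with
  | nil =>
    intro Sum cnt
    simp only [pvStates, pvSub, List.countP_cons, List.countP_nil]
    rw [show (decide ((0 : Int) = -Sum ∧ cnt + 0 > 0)) = (decide (Sum = 0 ∧ cnt > 0))
        from decide_eq_decide.mpr (by omega)]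
    by_cases h : Sum = 0 ∧ cnt > 0
    · simp [h]
    · simp [h]
  | cons x l ih =>
    intro Sum cnt
    show ((((pvStates l).flatMap
        (fun p => [p, (p.1 + x, p.2 + 1)])).countP
          (fun q => decide (q.1 = -Sum ∧ cnt + q.2 > 0)) : Nat) : Int) = _
    rw [pvCountP_pairflat (fun p => (p.1 + x, p.2 + 1))]
    have hfun : (fun (q : Int × Int) =>
        decide (((fun p => (p.1 + x, p.2 + 1)) q).1 = -Sum
          ∧ cnt + ((fun p => (p.1 + x, p.2 + 1)) q).2 > 0))
        = (fun (q : Int × Int) => decide (q.1 = -(Sum + x) ∧ (cnt + 1) + q.2 > 0)) := by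
      funext q
      show decide (q.1 + x = -Sum ∧ cnt + (q.2 + 1) > 0)
          = decide (q.1 = -(Sum + x) ∧ (cnt + 1) + q.2 > 0)
      exact decide_eq_decide.mpr (by omega)
    rw [hfun]
    push_cast
    rw [ih Sum cnt, ih (Sum + x) (cnt + 1)]
    rfl

-- ===== VERDICT (by name: the statement is the Claim_ definition above) =====
theorem countSubSeq_spec : Claim_equal_countSubSeq := by
  intro i Sum cnt a n _ hpre
  unfold Spec_countSubSeq countSubSeq countSubSeq_alt
  have hf : i + ((n - i).toNat : Int) = n := by
    have := hpre.1; omega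
  rw [pvGo_eq_pvSub (n - i).toNat i Sum cnt a n hf]
  simp only []
  rw [pvFold_eq_sumsL a (n - i).toNat i n hf]
  rw [pvFoldl_if_count (fun p : Int × Int => p.2 = -Sum ∧ cnt + (pvPopCount p.1.toNat : Int) > 0)]
  have h1 : ((PySem.List.enumerate (pvSumsL (pvElems (n - i).toNat i a)) 0).countP
        (fun q => decide (q.2 = -Sum ∧ cnt + (pvPopCount q.1.toNat : Int) > 0)))
      = ((pvStates (pvElems (n - i).toNat i a)).countP
          (fun q => decide (q.1 = -Sum ∧ cnt + q.2 > 0))) := by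
    rw [← pvEnum_states (pvElems (n - i).toNat i a), List.countP_map]
    rfl
  rw [h1, pvStates_count]
  omega
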